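-- pv_equiv track=rewrite | github.com/Jiaming-Zhu/visuotactile | scripts/visualization/visualize_gate_scores.py | sort_seed_labels
-- ===== SOURCE A (Python) =====
-- from typing import Dict, List, Optional, Sequence, Tuple
--
-- def sort_seed_labels(labels: Sequence[str]) -> List[str]:
--     numeric: List[Tuple[int, str]] = []
--     other: List[str] = []
--     for label in labels:
--         try:
--             numeric.append((int(label), label))
--         except ValueError:
--             other.append(label)
--     numeric_sorted = [label for _, label in sorted(numeric, key=lambda x: x[0])]
--     other_sorted = sorted(other)
--     return numeric_sorted + other_sorted
-- ===== SOURCE B (Python) =====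
-- from typing import List, Sequence
--
--
-- def sort_seed_labels(labels: Sequence[str]) -> List[str]:
--     def key(label: str):
--         try:
--             return (0, int(label), '')
--         except ValueError:
--             return (1, 0, label)
--     return sorted(labels, key=key)
-- ===== Notes on version B (the rewrite author's own statement) =====
-- stated objective: simpler
-- what changed: A partitions labels into numeric/other, sorts each list separately and concatenates; B performs one stable sort of the whole list under a single composite key (0, int(label), '') for numeric labels and (1, 0, label) for the rest.
import Mathlib
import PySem

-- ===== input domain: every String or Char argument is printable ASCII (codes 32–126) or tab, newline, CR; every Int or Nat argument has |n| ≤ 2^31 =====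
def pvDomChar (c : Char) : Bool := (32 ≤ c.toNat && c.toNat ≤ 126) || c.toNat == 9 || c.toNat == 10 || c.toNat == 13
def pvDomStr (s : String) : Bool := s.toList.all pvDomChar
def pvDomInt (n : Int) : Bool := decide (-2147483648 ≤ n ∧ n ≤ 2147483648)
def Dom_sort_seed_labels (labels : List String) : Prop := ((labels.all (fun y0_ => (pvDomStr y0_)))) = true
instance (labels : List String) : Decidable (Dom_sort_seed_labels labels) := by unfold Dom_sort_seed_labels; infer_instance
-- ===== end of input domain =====

-- B replaces A's partition-then-two-sorts-then-concatenate with one stable sort of the whole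
-- list under a single composite key (numeric group first, then int value / string); objective: simpler.

-- ===== PORT A =====
def sort_seed_labels (labels : List String) : List String :=
  let acc := labels.foldl
    (fun (acc : List (Int × String) × List String) label =>
      match PySem.Int.ofStr? label with
      | some n => (acc.1 ++ [(n, label)], acc.2)     -- numeric.append((int(label), label))
      | none   => (acc.1, acc.2 ++ [label]))         -- except ValueError: other.append(label)
    ([], [])
  let numeric_sorted := (PySem.List.sorted acc.1 (fun x => x.1)).map (fun x => x.2)
  let other_sorted := PySem.List.sorted acc.2 (fun x => x)
  numeric_sorted ++ other_sorted

-- ===== PORT B =====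
-- key(label) = (0, int(label), '') when int succeeds, else (1, 0, label)
def pvKey (label : String) : Int × Int × String :=
  match PySem.Int.ofStr? label with
  | some n => (0, n, "")
  | none   => (1, 0, label)

-- Python's '<' on the two key triples, written out (lexicographic component comparison)
def pvKeyLt (a b : String) : Bool :=
  let ka := pvKey a
  let kb := pvKey b
  decide (ka.1 < kb.1) ||
    (ka.1 == kb.1 && (decide (ka.2.1 < kb.2.1) ||
      (ka.2.1 == kb.2.1 && decide (ka.2.2 < kb.2.2))))

-- sorted(labels, key=key): PySem's stable insertion sort with the key comparison above
def sort_seed_labels_alt (labels : List String) : List String :=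
  labels.foldl (fun acc x => PySem.List.insertBy pvKeyLt x acc) []

-- ===== PRECONDITION & SPEC =====
def Spec_sort_seed_labels (labels : List String) (out : List String) : Prop := out = sort_seed_labels_alt labels
instance (labels : List String) (out : List String) : Decidable (Spec_sort_seed_labels labels out) := by unfold Spec_sort_seed_labels; infer_instance

-- ===== CLAIM (what is proved, stated in full; the proofs are below) =====
def Claim_equal_sort_seed_labels : Prop := ∀ (labels : List String), Dom_sort_seed_labels labels → Spec_sort_seed_labels labels (sort_seed_labels labels)

-- ===== LEMMAS AND PROOFS =====

-- abbreviations used only by the proofs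
def pvP (l : String) : Bool := (PySem.Int.ofStr? l).isSome
def pvF (l : String) : Int := (PySem.Int.ofStr? l).getD 0
def pvIns {α : Type} (before : α → α → Bool) : List α → List α → List α :=
  fun acc xs => xs.foldl (fun acc x => PySem.List.insertBy before x acc) acc

theorem pvIns_cons {α : Type} (before : α → α → Bool) (acc : List α) (x : α) (xs : List α) :
    pvIns before acc (x :: xs) = pvIns before (PySem.List.insertBy before x acc) xs := rfl

-- inserting an element that sorts before everything in l2 only touches l1
theorem pv_insertBy_append_right {α : Type} (before : α → α → Bool) (x : α)
    (l1 l2 : List α) (h : ∀ y ∈ l2, before x y = true) :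
    PySem.List.insertBy before x (l1 ++ l2) = PySem.List.insertBy before x l1 ++ l2 := by
  induction l1 with
  | nil =>
    cases l2 with
    | nil => rfl
    | cons y t => simp [PySem.List.insertBy, h y (by simp)]
  | cons a l1 ih =>
    by_cases hb : before x a = true
    · simp [PySem.List.insertBy, hb]
    · simp [PySem.List.insertBy, hb, ih]

-- inserting an element that sorts after everything in l1 only touches l2
theorem pv_insertBy_append_left {α : Type} (before : α → α → Bool) (x : α)
    (l1 l2 : List α) (h : ∀ y ∈ l1, before x y = false) :
    PySem.List.insertBy before x (l1 ++ l2) = l1 ++ PySem.List.insertBy before x l2 := by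
  induction l1 with
  | nil => rfl
  | cons a l1 ih =>
    have ha : before x a = false := h a (by simp)
    simp [PySem.List.insertBy, ha]
    exact ih (fun y hy => h y (by simp [hy]))

-- insertBy only consults before x · on members of the accumulator
theorem pv_insertBy_congr {α : Type} (b b' : α → α → Bool) (x : α) (ys : List α)
    (h : ∀ y ∈ ys, b x y = b' x y) :
    PySem.List.insertBy b x ys = PySem.List.insertBy b' x ys := by
  induction ys with
  | nil => rfl
  | cons y t ih =>
    have hy : b x y = b' x y := h y (by simp)
    by_cases hb : b x y = true
    · simp [PySem.List.insertBy, hb, hy ▸ hb]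
    · have hb' : b' x y = false := by rw [← hy]; simpa using hb
      simp [PySem.List.insertBy, hb, hb']
      exact ih (fun y hy2 => h y (by simp [hy2]))

-- the sort only compares members: comparisons agreeing on the list give the same result
theorem pv_foldl_congr {α : Type} (b b' : α → α → Bool) (S : List α)
    (h : ∀ a ∈ S, ∀ c ∈ S, b a c = b' a c) :
    ∀ (xs acc : List α), (∀ y ∈ xs, y ∈ S) → (∀ y ∈ acc, y ∈ S) →
      pvIns b acc xs = pvIns b' acc xs := by
  intro xs
  induction xs with
  | nil => intro acc _ _; rfl
  | cons x t ih =>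
    intro acc hxs hacc
    have hx : x ∈ S := hxs x (by simp)
    have heq : PySem.List.insertBy b x acc = PySem.List.insertBy b' x acc :=
      pv_insertBy_congr _ _ _ _ (fun y hy => h x hx y (hacc y hy))
    rw [pvIns_cons, pvIns_cons, heq]
    refine ih _ (fun y hy => hxs y (by simp [hy])) (fun y hy => ?_)
    rcases (PySem.List.mem_insertBy _ _ _ _).mp (heq ▸ hy) with h1 | h1
    · exact h1 ▸ hx
    · exact hacc y h1

-- stable sort of a two-group list splits as the concatenation of the groups' sorts
theorem pv_foldl_split {α : Type} (P : α → Bool) (before : α → α → Bool)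
    (hsep1 : ∀ a b, P a = true → P b = false → before a b = true)
    (hsep2 : ∀ a b, P a = true → P b = false → before b a = false) :
    ∀ (xs accP accN : List α), (∀ y ∈ accP, P y = true) → (∀ y ∈ accN, P y = false) →
      pvIns before (accP ++ accN) xs
      = pvIns before accP (xs.filter P) ++ pvIns before accN (xs.filter (fun a => !P a)) := by
  intro xs
  induction xs with
  | nil => intro accP accN _ _; rfl
  | cons x t ih =>
    intro accP accN hP hN
    by_cases hx : P x = true
    · have h1 : PySem.List.insertBy before x (accP ++ accN)
          = PySem.List.insertBy before x accP ++ accN :=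
        pv_insertBy_append_right _ _ _ _ (fun y hy => hsep1 x y hx (hN y hy))
      have hP' : ∀ y ∈ PySem.List.insertBy before x accP, P y = true := by
        intro y hy
        rcases (PySem.List.mem_insertBy _ _ _ _).mp hy with h1 | h1
        · exact h1 ▸ hx
        · exact hP y h1
      rw [pvIns_cons, h1, List.filter_cons, if_pos hx, pvIns_cons]
      have : (x :: t).filter (fun a => !P a) = t.filter (fun a => !P a) := by
        simp [hx]
      rw [this]
      exact ih _ accN hP' hN
    · have hxf : P x = false := by simpa using hx
      have h1 : PySem.List.insertBy before x (accP ++ accN)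
          = accP ++ PySem.List.insertBy before x accN :=
        pv_insertBy_append_left _ _ _ _ (fun y hy => hsep2 y x (hP y hy) hxf)
      have hN' : ∀ y ∈ PySem.List.insertBy before x accN, P y = false := by
        intro y hy
        rcases (PySem.List.mem_insertBy _ _ _ _).mp hy with h1 | h1
        · exact h1 ▸ hxf
        · exact hN y h1
      rw [pvIns_cons, h1, List.filter_cons, if_neg (by simp [hxf]), List.filter_cons,
        if_pos (by simp [hxf]), pvIns_cons]
      exact ih accP _ hP hN'

-- decoration: sorting (f a, a) pairs by fst then projecting snd = sorting by f
theorem pv_insertBy_map_dec {α κ : Type} [LinearOrder κ] (f : α → κ) (a : α) (ys : List α) :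
    PySem.List.insertBy (fun p q : κ × α => decide (p.1 < q.1)) (f a, a) (ys.map (fun y => (f y, y)))
      = (PySem.List.insertBy (fun u v => decide (f u < f v)) a ys).map (fun y => (f y, y)) := by
  induction ys with
  | nil => rfl
  | cons y t ih =>
    by_cases hb : decide (f a < f y) = true
    · simp [PySem.List.insertBy, hb]
    · have hb' : decide (f a < f y) = false := by simpa using hb
      simp [PySem.List.insertBy, hb', ih]

theorem pv_foldl_map_dec {α κ : Type} [LinearOrder κ] (f : α → κ) :
    ∀ (xs ys : List α),
      pvIns (fun p q : κ × α => decide (p.1 < q.1)) (ys.map (fun y => (f y, y))) (xs.map (fun y => (f y, y)))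
      = (pvIns (fun u v => decide (f u < f v)) ys xs).map (fun y => (f y, y)) := by
  intro xs
  induction xs with
  | nil => intro ys; rfl
  | cons x t ih =>
    intro ys
    rw [List.map_cons, pvIns_cons, pvIns_cons, pv_insertBy_map_dec]
    exact ih _

theorem pv_sorted_dec {α κ : Type} [LinearOrder κ] (f : α → κ) (xs : List α) :
    (PySem.List.sorted (xs.map (fun y => (f y, y))) (fun p => p.1)).map (fun p => p.2)
      = pvIns (fun u v => decide (f u < f v)) [] xs := by
  rw [PySem.List.sorted_eq_foldl_insertBy]
  have h0 : (([] : List α).map (fun y => (f y, y))) = [] := rfl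
  have := pv_foldl_map_dec f xs []
  rw [h0] at this
  rw [show (xs.map (fun y => (f y, y))).foldl
      (fun acc x => PySem.List.insertBy (fun a b => decide (a.1 < b.1)) x acc) []
      = pvIns (fun p q : κ × α => decide (p.1 < q.1)) [] (xs.map (fun y => (f y, y))) from rfl,
    this, List.map_map]
  have hid : ((fun p : κ × α => p.2) ∘ fun y => (f y, y)) = id := rfl
  rw [hid, List.map_id]

-- A's partition loop written as filters
theorem pv_partition_foldl :
    ∀ (labels : List String) (accP : List (Int × String)) (accN : List String),
      labels.foldl
        (fun (acc : List (Int × String) × List String) label =>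
          match PySem.Int.ofStr? label with
          | some n => (acc.1 ++ [(n, label)], acc.2)
          | none   => (acc.1, acc.2 ++ [label])) (accP, accN)
      = (accP ++ (labels.filter pvP).map (fun l => (pvF l, l)), accN ++ labels.filter (fun l => !pvP l)) := by
  intro labels
  induction labels with
  | nil => intro accP accN; simp
  | cons l t ih =>
    intro accP accN
    cases h : PySem.Int.ofStr? l with
    | some n =>
      have hp : pvP l = true := by simp [pvP, h]
      have hf : pvF l = n := by simp [pvF, h]
      simp only [List.foldl_cons, h, List.filter_cons, hp]
      rw [ih]
      simp [hf]
    | none =>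
      have hp : pvP l = false := by simp [pvP, h]
      simp only [List.foldl_cons, h, List.filter_cons, hp]
      rw [ih]
      simp

-- the composite key comparison inside each group, and across groups
theorem pv_key_lt_numeric (a c : String) (ha : pvP a = true) (hc : pvP c = true) :
    pvKeyLt a c = decide (pvF a < pvF c) := by
  rcases Option.isSome_iff_exists.mp (by simpa [pvP] using ha) with ⟨n, hn⟩
  rcases Option.isSome_iff_exists.mp (by simpa [pvP] using hc) with ⟨m, hm⟩
  simp [pvKeyLt, pvKey, hn, hm, pvF]

theorem pv_key_lt_other (a c : String) (ha : pvP a = false) (hc : pvP c = false) :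
    pvKeyLt a c = decide (a < c) := by
  have ha' : PySem.Int.ofStr? a = none := by simpa [pvP] using ha
  have hc' : PySem.Int.ofStr? c = none := by simpa [pvP] using hc
  simp [pvKeyLt, pvKey, ha', hc']

theorem pv_key_sep1 (a b : String) (ha : pvP a = true) (hb : pvP b = false) :
    pvKeyLt a b = true := by
  rcases Option.isSome_iff_exists.mp (by simpa [pvP] using ha) with ⟨n, hn⟩
  have hb' : PySem.Int.ofStr? b = none := by simpa [pvP] using hb
  simp [pvKeyLt, pvKey, hn, hb']

theorem pv_key_sep2 (a b : String) (ha : pvP a = true) (hb : pvP b = false) :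
    pvKeyLt b a = false := by
  rcases Option.isSome_iff_exists.mp (by simpa [pvP] using ha) with ⟨n, hn⟩
  have hb' : PySem.Int.ofStr? b = none := by simpa [pvP] using hb
  simp [pvKeyLt, pvKey, hn, hb']

-- ===== VERDICT (by name: the statement is the Claim_ definition above) =====
theorem sort_seed_labels_spec : Claim_equal_sort_seed_labels := by
  intro labels _
  unfold Spec_sort_seed_labels sort_seed_labels sort_seed_labels_alt
  rw [pv_partition_foldl labels [] []]
  simp only [List.nil_append]
  rw [show labels.foldl (fun acc x => PySem.List.insertBy pvKeyLt x acc) []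
      = pvIns pvKeyLt ([] ++ []) labels from rfl]
  rw [pv_foldl_split pvP pvKeyLt pv_key_sep1 pv_key_sep2 labels [] [] (by simp) (by simp)]
  congr 1
  · -- numeric part
    rw [pv_sorted_dec pvF (labels.filter pvP)]
    exact pv_foldl_congr (fun u v => decide (pvF u < pvF v)) pvKeyLt (labels.filter pvP)
      (fun a ha c hc => (pv_key_lt_numeric a c (List.of_mem_filter ha) (List.of_mem_filter hc)).symm)
      (labels.filter pvP) [] (fun y hy => hy) (by simp)
  · -- other part
    rw [PySem.List.sorted_eq_foldl_insertBy]
    exact pv_foldl_congr (fun a b => decide (a < b)) pvKeyLt (labels.filter (fun l => !pvP l))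
      (fun a ha c hc => (pv_key_lt_other a c (by simpa using List.of_mem_filter ha)
        (by simpa using List.of_mem_filter hc)).symm)
      (labels.filter (fun l => !pvP l)) [] (fun y hy => hy) (by simp)
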